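-- pv_equiv track=rewrite | github.com/DiogoTCouto/IA-Artificial-Intelligence- | TPG-ia_104288-main/student.py | find_other_corners
-- ===== SOURCE A (Python) =====
-- def find_other_corners(open_positions):
--     other_corners = []
--
--
--     if len(open_positions) > 2:
--         for i in range(1, len(open_positions) - 1):
--             curr_pos = open_positions[i]
--             prev_pos = open_positions[i - 1]
--             next_pos = open_positions[i + 1]
--
--
--             diff_curr_prev = [curr_pos[j] - prev_pos[j] for j in range(2)]
--             diff_next_curr = [next_pos[j] - curr_pos[j] for j in range(2)]
--
--
--             if diff_curr_prev != diff_next_curr: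
--                 other_corners.append(curr_pos)
--
--     return other_corners
-- ===== SOURCE B (Python) =====
-- def find_other_corners(open_positions):
--     # Run-skipping scan: repeatedly find the maximal prefix run of constant
--     # delta, emit the point where the run breaks, and restart from there.
--     corners = []
--     rest = open_positions
--     while len(rest) >= 3:
--         d = (rest[1][0] - rest[0][0], rest[1][1] - rest[0][1])
--         k = 1
--         while k + 1 < len(rest) and \
--                 (rest[k + 1][0] - rest[k][0], rest[k + 1][1] - rest[k][1]) == d:
--             k += 1
--         if k + 1 < len(rest):
--             corners.append(rest[k])
--         rest = rest[k:]
--     return corners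
-- ===== Notes on version B (the rewrite author's own statement) =====
-- stated objective: alternative
-- what changed: B replaces A's per-index pass (comparing the two adjacent difference vectors at every interior point) with a run-skipping outer loop: an inner scan finds the end of each maximal constant-delta run, the break point is emitted once per run, and the scan restarts at that point.
import Mathlib
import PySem

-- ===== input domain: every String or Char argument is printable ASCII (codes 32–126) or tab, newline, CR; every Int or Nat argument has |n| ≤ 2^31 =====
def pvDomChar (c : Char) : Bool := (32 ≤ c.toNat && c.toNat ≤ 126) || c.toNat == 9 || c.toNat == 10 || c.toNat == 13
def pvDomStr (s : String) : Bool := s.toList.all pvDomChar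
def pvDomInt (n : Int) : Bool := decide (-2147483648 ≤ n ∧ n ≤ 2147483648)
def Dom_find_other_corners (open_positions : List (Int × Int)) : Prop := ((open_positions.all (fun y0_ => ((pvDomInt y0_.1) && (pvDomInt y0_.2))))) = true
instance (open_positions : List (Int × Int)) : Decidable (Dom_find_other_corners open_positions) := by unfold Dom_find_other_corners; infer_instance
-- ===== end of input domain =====

-- B replaces A's per-index scan with a run-skipping outer loop over maximal constant-delta runs (alternative decomposition, same cost).

-- ===== PORT A =====
def find_other_corners (open_positions : List (Int × Int)) : List (Int × Int) :=
  if (open_positions.length : Int) > 2 then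
    (PySem.List.pyRange 1 ((open_positions.length : Int) - 1) 1).foldl (fun acc i =>
      let curr := PySem.List.pyGetD open_positions i (0, 0)
      let prev := PySem.List.pyGetD open_positions (i - 1) (0, 0)
      let next := PySem.List.pyGetD open_positions (i + 1) (0, 0)
      let diff_curr_prev := [curr.1 - prev.1, curr.2 - prev.2]
      let diff_next_curr := [next.1 - curr.1, next.2 - curr.2]
      if diff_curr_prev ≠ diff_next_curr then acc ++ [curr] else acc) []
  else []

-- ===== PORT B =====
-- rest[k+1][j] - rest[k][j] with 0 ≤ k and k+1 < len(rest): in-range nonneg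
-- Python indexing, exactly List.getD at the Nat index.
def pvDeltaAt (rest : List (Int × Int)) (k : Nat) : Int × Int :=
  ((rest.getD (k + 1) (0, 0)).1 - (rest.getD k (0, 0)).1,
   (rest.getD (k + 1) (0, 0)).2 - (rest.getD k (0, 0)).2)

-- inner while loop of Source B: advance k while the next delta equals d.
-- The fuel argument (rest.length at the call site) only makes the loop total:
-- the loop body runs at most rest.length - 2 times.
def pvInnerGo (rest : List (Int × Int)) (d : Int × Int) : Nat → Nat → Nat
  | 0, k => k
  | fuel + 1, k =>
    if k + 1 < rest.length ∧ pvDeltaAt rest k = d then pvInnerGo rest d fuel (k + 1) else k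

def pvInner (rest : List (Int × Int)) (d : Int × Int) (k : Nat) : Nat :=
  pvInnerGo rest d rest.length k

-- outer while loop of Source B; rest[k:] with k ≥ 0 is List.drop k.
-- fuel = rest.length at the call site: each iteration drops k ≥ 1 elements.
def pvOuterGo : Nat → List (Int × Int) → List (Int × Int) → List (Int × Int)
  | 0, _, acc => acc
  | fuel + 1, rest, acc =>
    if 3 ≤ rest.length then
      let d := pvDeltaAt rest 0
      let k := pvInner rest d 1
      pvOuterGo fuel (rest.drop k)
        (if k + 1 < rest.length then acc ++ [rest.getD k (0, 0)] else acc)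
    else acc

def pvOuter (rest : List (Int × Int)) (acc : List (Int × Int)) : List (Int × Int) :=
  pvOuterGo rest.length rest acc

def find_other_corners_alt (open_positions : List (Int × Int)) : List (Int × Int) :=
  pvOuter open_positions []

-- ===== PRECONDITION & SPEC =====
def Spec_find_other_corners (open_positions : List (Int × Int)) (out : List (Int × Int)) : Prop := out = find_other_corners_alt open_positions
instance (open_positions : List (Int × Int)) (out : List (Int × Int)) : Decidable (Spec_find_other_corners open_positions out) := by unfold Spec_find_other_corners; infer_instance

-- ===== CLAIM (what is proved, stated in full; the proofs are below) =====
def Claim_equal_find_other_corners : Prop := ∀ (open_positions : List (Int × Int)), Dom_find_other_corners open_positions → Spec_find_other_corners open_positions (find_other_corners open_positions)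

-- ===== LEMMAS AND PROOFS =====
theorem pv_shift {α : Type} (a : α) (ys : List α) (j : Int) (d : α) (hj : 0 ≤ j) :
    PySem.List.pyGetD (a :: ys) (j + 1) d = PySem.List.pyGetD ys j d := by
  rw [PySem.List.pyGetD_of_nonneg _ _ (by omega), PySem.List.pyGetD_of_nonneg _ _ hj]
  have h : (j + 1).toNat = j.toNat + 1 := by omega
  rw [h, List.getD_cons_succ]

abbrev pvP (xs : List (Int × Int)) (i : Int) : Prop :=
  let curr := PySem.List.pyGetD xs i (0, 0)
  let prev := PySem.List.pyGetD xs (i - 1) (0, 0)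
  let next := PySem.List.pyGetD xs (i + 1) (0, 0)
  [curr.1 - prev.1, curr.2 - prev.2] ≠ [next.1 - curr.1, next.2 - curr.2]

theorem pv_A_char (xs : List (Int × Int)) :
    find_other_corners xs
      = ((PySem.List.pyRange 1 ((xs.length : Int) - 1) 1).filter
          (fun i => decide (pvP xs i))).map (fun i => PySem.List.pyGetD xs i (0, 0)) := by
  unfold find_other_corners
  split_ifs with h
  · refine (PySem.List.foldl_append_ite (pvP xs)
      (fun i => PySem.List.pyGetD xs i (0, 0)) _ []).trans ?_
    simp
  · rw [PySem.List.pyRange_one_eq_nil (by omega)]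
    simp

theorem pv_range_shift (m : Int) :
    PySem.List.pyRange 2 (m + 1) 1 = (PySem.List.pyRange 1 m 1).map (· + 1) := by
  rw [PySem.List.pyRange_one, PySem.List.pyRange_one, List.map_map]
  have h : (m + 1 - 2).toNat = (m - 1).toNat := by omega
  rw [h]
  exact List.map_congr_left (fun k _ => by simp; ring)

theorem pv_P_shift (a : Int × Int) (ys : List (Int × Int)) (i : Int) (hi : 1 ≤ i) :
    pvP (a :: ys) (i + 1) = pvP ys i := by
  have e1 : i + 1 - 1 = (i - 1) + 1 := by ring
  unfold pvP
  rw [e1, pv_shift _ _ _ _ (by omega), pv_shift _ _ _ _ (by omega),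
      pv_shift _ _ _ _ (by omega)]

theorem pv_A_cons (a b c : Int × Int) (t : List (Int × Int)) :
    find_other_corners (a :: b :: c :: t)
      = (if [b.1 - a.1, b.2 - a.2] ≠ [c.1 - b.1, c.2 - b.2] then [b] else [])
        ++ find_other_corners (b :: c :: t) := by
  rw [pv_A_char, pv_A_char]
  have hlen : ((a :: b :: c :: t).length : Int) - 1 = ((t.length : Int) + 1) + 1 := by simp
  have hlen2 : ((b :: c :: t).length : Int) - 1 = (t.length : Int) + 1 := by simp
  rw [hlen, hlen2]
  rw [PySem.List.pyRange_one_cons (by omega), show (1:Int) + 1 = 2 from rfl,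
      pv_range_shift]
  rw [List.filter_cons]
  have hP1 : decide (pvP (a :: b :: c :: t) 1) = decide ([b.1 - a.1, b.2 - a.2] ≠ [c.1 - b.1, c.2 - b.2]) := by
    unfold pvP
    norm_num [PySem.List.pyGetD, PySem.List.pyGet?, PySem.List.pyIdx?,
      show (0:Int) ≤ (t.length:Int) + 1 by omega,
      show (0:Int) ≤ (t.length:Int) + 1 + 1 by omega,
      show (2:Int) ≤ (t.length:Int) + 1 + 1 by omega,
      show Int.toNat 2 = 2 from rfl]
  rw [hP1, List.filter_map]
  have htail : List.map (fun i => PySem.List.pyGetD (a :: b :: c :: t) i (0, 0))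
        (List.map (· + 1) (List.filter ((fun i => decide (pvP (a :: b :: c :: t) i)) ∘ (· + 1))
          (PySem.List.pyRange 1 ((t.length : Int) + 1))))
      = List.map (fun i => PySem.List.pyGetD (b :: c :: t) i (0, 0))
        (List.filter (fun i => decide (pvP (b :: c :: t) i))
          (PySem.List.pyRange 1 ((t.length : Int) + 1))) := by
    rw [List.map_map]
    have hfilter : List.filter ((fun i => decide (pvP (a :: b :: c :: t) i)) ∘ (· + 1))
          (PySem.List.pyRange 1 ((t.length : Int) + 1))
        = List.filter (fun i => decide (pvP (b :: c :: t) i))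
          (PySem.List.pyRange 1 ((t.length : Int) + 1)) := by
      refine List.filter_congr (fun i hi => ?_)
      have h1 : 1 ≤ i := (PySem.List.mem_pyRange_one.mp hi).1
      simp only [Function.comp]
      exact decide_eq_decide.mpr (iff_of_eq (pv_P_shift _ _ _ h1))
    rw [hfilter]
    refine List.map_congr_left (fun i hi => ?_)
    have h1 : 1 ≤ i := (PySem.List.mem_pyRange_one.mp (List.mem_of_mem_filter hi)).1
    simp only [Function.comp]
    rw [pv_shift _ _ _ _ (by omega)]
  simp only [decide_eq_true_eq]
  split_ifs with hc
  · rw [List.map_cons, htail]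
    simp [PySem.List.pyGetD, PySem.List.pyGet?, PySem.List.pyIdx?,
      show (0:Int) ≤ (t.length:Int) + 1 by omega]
  · rw [htail]
    simp

theorem pv_A_short (xs : List (Int × Int)) (h : xs.length ≤ 2) :
    find_other_corners xs = [] := by
  unfold find_other_corners
  rw [if_neg (by push_cast; omega)]

theorem pvDeltaAt_shift (a : Int × Int) (ys : List (Int × Int)) (j : Nat) :
    pvDeltaAt (a :: ys) (j + 1) = pvDeltaAt ys j := by
  simp [pvDeltaAt]

theorem pvInnerGo_irrel (rest : List (Int × Int)) (d : Int × Int) :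
    ∀ f1 f2 k : Nat, rest.length ≤ k + f1 → rest.length ≤ k + f2 →
      pvInnerGo rest d f1 k = pvInnerGo rest d f2 k := by
  intro f1
  induction f1 with
  | zero =>
    intro f2 k h1 h2
    cases f2 with
    | zero => rfl
    | succ g =>
      simp only [pvInnerGo]
      rw [if_neg (by rintro ⟨hx, -⟩; omega)]
  | succ f ihf =>
    intro f2 k h1 h2
    cases f2 with
    | zero =>
      simp only [pvInnerGo]
      rw [if_neg (by rintro ⟨hx, -⟩; omega)]
    | succ g =>
      simp only [pvInnerGo]
      by_cases hc : k + 1 < rest.length ∧ pvDeltaAt rest k = d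
      · rw [if_pos hc, if_pos hc]
        exact ihf g (k + 1) (by omega) (by omega)
      · rw [if_neg hc, if_neg hc]

theorem pvInner_unfold (rest : List (Int × Int)) (d : Int × Int) (k : Nat) :
    pvInner rest d k
      = if k + 1 < rest.length ∧ pvDeltaAt rest k = d then pvInner rest d (k + 1) else k := by
  unfold pvInner
  cases hn : rest.length with
  | zero =>
    simp only [pvInnerGo]
    rw [if_neg (by rintro ⟨hx, -⟩; omega)]
  | succ m =>
    simp only [pvInnerGo]
    by_cases hc : k + 1 < rest.length ∧ pvDeltaAt rest k = d
    · rw [if_pos hc, if_pos ⟨by omega, hc.2⟩]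
      exact pvInnerGo_irrel rest d m (m + 1) (k + 1) (by omega) (by omega)
    · rw [if_neg hc, if_neg (by rintro ⟨h1, h2⟩; exact hc ⟨by omega, h2⟩)]

theorem pvInner_stop (rest : List (Int × Int)) (d : Int × Int) (k : Nat)
    (h : ¬(k + 1 < rest.length ∧ pvDeltaAt rest k = d)) : pvInner rest d k = k := by
  rw [pvInner_unfold, if_neg h]

theorem pvInnerGo_shift (a : Int × Int) (ys : List (Int × Int)) (d : Int × Int) :
    ∀ fuel j : Nat, pvInnerGo (a :: ys) d fuel (j + 1) = pvInnerGo ys d fuel j + 1 := by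
  intro fuel
  induction fuel with
  | zero => intro j; rfl
  | succ f ih =>
    intro j
    simp only [pvInnerGo, List.length_cons, pvDeltaAt_shift]
    by_cases hc : j + 1 < ys.length ∧ pvDeltaAt ys j = d
    · rw [if_pos ⟨by omega, hc.2⟩, if_pos hc]
      exact ih (j + 1)
    · rw [if_neg (by rintro ⟨h1, h2⟩; exact hc ⟨by omega, h2⟩), if_neg hc]

theorem pvInner_shift (a : Int × Int) (ys : List (Int × Int)) (d : Int × Int) (j : Nat) :
    pvInner (a :: ys) d (j + 1) = pvInner ys d j + 1 := by
  unfold pvInner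
  simp only [List.length_cons]
  rw [pvInnerGo_irrel (a :: ys) d (ys.length + 1) ys.length (j + 1)
        (by simp only [List.length_cons]; omega) (by simp only [List.length_cons]; omega)]
  exact pvInnerGo_shift a ys d ys.length j

theorem pvInnerGo_ge (rest : List (Int × Int)) (d : Int × Int) :
    ∀ fuel k : Nat, k ≤ pvInnerGo rest d fuel k := by
  intro fuel
  induction fuel with
  | zero => intro k; exact Nat.le_refl k
  | succ f ih =>
    intro k
    simp only [pvInnerGo]
    split
    · exact Nat.le_trans (Nat.le_succ k) (ih (k + 1))
    · exact Nat.le_refl k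

theorem pvInner_ge (rest : List (Int × Int)) (d : Int × Int) (k : Nat) :
    k ≤ pvInner rest d k :=
  pvInnerGo_ge rest d rest.length k

theorem pvOuterGo_irrel :
    ∀ f1 f2 : Nat, ∀ rest acc : List (Int × Int), rest.length ≤ f1 → rest.length ≤ f2 →
      pvOuterGo f1 rest acc = pvOuterGo f2 rest acc := by
  intro f1
  induction f1 with
  | zero =>
    intro f2 rest acc h1 h2
    cases f2 with
    | zero => rfl
    | succ g =>
      simp only [pvOuterGo]
      rw [if_neg (by omega)]
  | succ f ih =>
    intro f2 rest acc h1 h2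
    cases f2 with
    | zero =>
      simp only [pvOuterGo]
      rw [if_neg (by omega)]
    | succ g =>
      simp only [pvOuterGo]
      by_cases hc : 3 ≤ rest.length
      · rw [if_pos hc, if_pos hc]
        have hk := pvInner_ge rest (pvDeltaAt rest 0) 1
        exact ih g (rest.drop (pvInner rest (pvDeltaAt rest 0) 1)) _
          (by rw [List.length_drop]; omega) (by rw [List.length_drop]; omega)
      · rw [if_neg hc, if_neg hc]

theorem pvOuter_step (rest acc : List (Int × Int)) (h : 3 ≤ rest.length) :
    pvOuter rest acc
      = pvOuter (rest.drop (pvInner rest (pvDeltaAt rest 0) 1))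
          (if pvInner rest (pvDeltaAt rest 0) 1 + 1 < rest.length
           then acc ++ [rest.getD (pvInner rest (pvDeltaAt rest 0) 1) (0, 0)] else acc) := by
  unfold pvOuter
  cases hn : rest.length with
  | zero => omega
  | succ m =>
    simp only [pvOuterGo]
    rw [if_pos h, hn]
    have hk := pvInner_ge rest (pvDeltaAt rest 0) 1
    exact pvOuterGo_irrel m (rest.drop (pvInner rest (pvDeltaAt rest 0) 1)).length
      (rest.drop (pvInner rest (pvDeltaAt rest 0) 1)) _
      (by rw [List.length_drop]; omega) (Nat.le_refl _)

theorem pvOuter_stop (rest acc : List (Int × Int)) (h : ¬ 3 ≤ rest.length) :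
    pvOuter rest acc = acc := by
  unfold pvOuter
  cases hn : rest.length with
  | zero => rfl
  | succ m =>
    simp only [pvOuterGo]
    rw [if_neg h]

theorem pvOuter_skip (a b c : Int × Int) (t : List (Int × Int)) (acc : List (Int × Int))
    (hd : pvDeltaAt (a :: b :: c :: t) 1 = pvDeltaAt (a :: b :: c :: t) 0) :
    pvOuter (a :: b :: c :: t) acc = pvOuter (b :: c :: t) acc := by
  have hdt : pvDeltaAt (b :: c :: t) 0 = pvDeltaAt (a :: b :: c :: t) 0 :=
    (pvDeltaAt_shift a (b :: c :: t) 0).symm.trans hd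
  have hk : pvInner (a :: b :: c :: t) (pvDeltaAt (a :: b :: c :: t) 0) 1
      = pvInner (b :: c :: t) (pvDeltaAt (a :: b :: c :: t) 0) 1 + 1 := by
    rw [pvInner_unfold, if_pos ⟨by simp, hd⟩]
    exact pvInner_shift a (b :: c :: t) _ 1
  rw [pvOuter_step _ _ (by simp), hk]
  by_cases h3 : 3 ≤ (b :: c :: t).length
  · rw [pvOuter_step (b :: c :: t) acc h3, hdt]
    have e1 : (a :: b :: c :: t).drop
          (pvInner (b :: c :: t) (pvDeltaAt (a :: b :: c :: t) 0) 1 + 1)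
        = (b :: c :: t).drop (pvInner (b :: c :: t) (pvDeltaAt (a :: b :: c :: t) 0) 1) := rfl
    have e2 : (a :: b :: c :: t).getD
          (pvInner (b :: c :: t) (pvDeltaAt (a :: b :: c :: t) 0) 1 + 1) (0, 0)
        = (b :: c :: t).getD (pvInner (b :: c :: t) (pvDeltaAt (a :: b :: c :: t) 0) 1) (0, 0) :=
      List.getD_cons_succ
    have hiff : (pvInner (b :: c :: t) (pvDeltaAt (a :: b :: c :: t) 0) 1 + 1 + 1
          < (a :: b :: c :: t).length)
        ↔ (pvInner (b :: c :: t) (pvDeltaAt (a :: b :: c :: t) 0) 1 + 1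
          < (b :: c :: t).length) := by
      simp only [List.length_cons]
      omega
    rw [e1, e2, if_congr hiff rfl rfl]
  · have ht : t = [] := by
      cases t with
      | nil => rfl
      | cons x xs => simp at h3
    subst ht
    have hk1 : pvInner [b, c] (pvDeltaAt [a, b, c] 0) 1 = 1 :=
      pvInner_stop _ _ _ (by simp)
    rw [hk1, if_neg (by simp), pvOuter_stop _ _ (by simp), pvOuter_stop _ _ (by simp)]

theorem pv_outer_main (n : Nat) :
    ∀ rest acc : List (Int × Int), rest.length ≤ n →
      pvOuter rest acc = acc ++ find_other_corners rest := by
  induction n with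
  | zero =>
    intro rest acc hle
    have : rest = [] := List.eq_nil_of_length_eq_zero (by omega)
    subst this
    rw [pvOuter_stop _ _ (by simp), pv_A_short [] (by simp)]
    simp
  | succ n ih =>
    intro rest acc hle
    match rest with
    | [] => rw [pvOuter_stop _ _ (by simp), pv_A_short [] (by simp)]; simp
    | [a] => rw [pvOuter_stop _ _ (by simp), pv_A_short [a] (by simp)]; simp
    | [a, b] => rw [pvOuter_stop _ _ (by simp), pv_A_short [a, b] (by simp)]; simp
    | a :: b :: c :: t =>
      have hlen : (b :: c :: t).length ≤ n := by simp at hle ⊢; omega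
      by_cases hd : pvDeltaAt (a :: b :: c :: t) 1 = pvDeltaAt (a :: b :: c :: t) 0
      · rw [pvOuter_skip a b c t acc hd, ih (b :: c :: t) acc hlen, pv_A_cons]
        have hpair : (c.1 - b.1, c.2 - b.2) = (b.1 - a.1, b.2 - a.2) := by
          simpa [pvDeltaAt] using hd
        have hno : ¬([b.1 - a.1, b.2 - a.2] ≠ [c.1 - b.1, c.2 - b.2]) := by
          simp only [ne_eq, not_not]
          have h1 := congrArg Prod.fst hpair
          have h2 := congrArg Prod.snd hpair
          simp only at h1 h2
          simp [h1, h2]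
        rw [if_neg hno]
        simp
      · have hk1 : pvInner (a :: b :: c :: t) (pvDeltaAt (a :: b :: c :: t) 0) 1 = 1 :=
          pvInner_stop _ _ 1 (by rintro ⟨h1, h2⟩; exact hd h2)
        rw [pvOuter_step _ _ (by simp), hk1,
            if_pos (by simp), show (a :: b :: c :: t).getD 1 (0, 0) = b from rfl,
            show (a :: b :: c :: t).drop 1 = b :: c :: t from rfl,
            ih (b :: c :: t) (acc ++ [b]) hlen, pv_A_cons]
        have hpair : (c.1 - b.1, c.2 - b.2) ≠ (b.1 - a.1, b.2 - a.2) := by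
          simpa [pvDeltaAt] using hd
        have hyes : [b.1 - a.1, b.2 - a.2] ≠ [c.1 - b.1, c.2 - b.2] := by
          intro he
          apply hpair
          simp only [List.cons.injEq, and_true] at he
          simp [he.1, he.2]
        rw [if_pos hyes]
        simp

theorem pv_main (xs : List (Int × Int)) : find_other_corners xs = find_other_corners_alt xs := by
  unfold find_other_corners_alt
  rw [pv_outer_main xs.length xs [] (le_refl _)]
  simp

-- ===== VERDICT (by name: the statement is the Claim_ definition above) =====
theorem find_other_corners_spec : Claim_equal_find_other_corners := by
  intro xs _
  unfold Spec_find_other_corners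
  exact pv_main xs
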